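-- pv_equiv track=rewrite | github.com/Etnolekt/DataWarrior_to_Pandas | dwar2pd/parser.py | find_header_and_data_lines
-- ===== SOURCE A (Python) =====
-- from typing import Dict, List, Optional, Tuple
--
-- def find_header_and_data_lines(content: str) -> Tuple[Optional[List[str]], List[List[str]]]:
--     """Find header and data lines in DWAR file content."""
--     lines = content.split('\n')
--     data_lines = []
--     header_line = None
--
--     found_column_properties_end = False
--     header_found = False
--
--     for line in lines:
--         line = line.strip()
--
--         # Track column properties section
--         if '<column properties>' in line:
--             continue
--         elif '</column properties>' in line:
--             found_column_properties_end = True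
--             continue
--
--         # Look for header line after column properties
--         if (found_column_properties_end and line and '\t' in line and
--             not line.startswith('<') and not line.startswith('>') and not header_found):
--             parts = line.split('\t')
--             if len(parts) >= 3:
--                 header_line = parts
--                 header_found = True
--                 continue
--
--         # Look for data lines
--         if (line and '\t' in line and not line.startswith('<') and
--             not line.startswith('>') and not line.startswith('settings=')):
--             # Only add data lines after we've found the header
--             if header_found:
--                 data_lines.append(line.split('\t'))
--
--     return header_line, data_lines
-- ===== SOURCE B (Python) =====
-- def find_header_and_data_lines(content):
--     """Find header and data lines in DWAR file content."""
--     lines = [l.strip() for l in content.split('\n')]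
--     header_line = None
--     after = []
--     seen_end = False
--     for i, line in enumerate(lines):
--         if '<column properties>' in line:
--             continue
--         if '</column properties>' in line:
--             seen_end = True
--             continue
--         if seen_end and '\t' in line and not line.startswith(('<', '>')):
--             parts = line.split('\t')
--             if len(parts) >= 3:
--                 header_line = parts
--                 after = lines[i + 1:]
--                 break
--     data_lines = [line.split('\t') for line in after
--                   if '\t' in line
--                   and '<column properties>' not in line
--                   and '</column properties>' not in line
--                   and not line.startswith(('<', '>', 'settings='))]
--     return header_line, data_lines
-- ===== Notes on version B (the rewrite author's own statement) =====
-- stated objective: alternative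
-- what changed: B replaces A's single pass with four mutable flags by a two-phase decomposition: a first scan that locates the header line and the suffix after it, then a list comprehension filtering that suffix for data rows.
import Mathlib
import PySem

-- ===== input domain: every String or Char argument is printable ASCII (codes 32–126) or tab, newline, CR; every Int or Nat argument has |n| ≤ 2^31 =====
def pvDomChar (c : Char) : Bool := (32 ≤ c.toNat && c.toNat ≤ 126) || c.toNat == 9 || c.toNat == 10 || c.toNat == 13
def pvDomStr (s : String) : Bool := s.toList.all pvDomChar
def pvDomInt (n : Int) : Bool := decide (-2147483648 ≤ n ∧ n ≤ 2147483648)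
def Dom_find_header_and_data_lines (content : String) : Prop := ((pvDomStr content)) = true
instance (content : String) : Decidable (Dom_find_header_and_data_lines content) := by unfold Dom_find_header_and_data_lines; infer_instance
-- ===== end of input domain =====

-- B replaces A's one-pass four-flag loop by a two-phase decomposition (find header + suffix, then filter that suffix); same cost, proved equal on all inputs.


-- ===== PORT A =====
-- s.split(sep) for a nonempty literal sep, via the PySem.Chars primitive (exact)
def pvSplit (s sep : String) : List String :=
  (PySem.Chars.splitOn s.toList sep.toList).map (fun cs => String.ofList cs)

-- the trailing "Look for data lines" block of A's loop body;
-- state: (found_column_properties_end, header_found, header_line, data_lines)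
def pvADataCheck (st : Bool × Bool × Option (List String) × List (List String))
    (line : String) : Bool × Bool × Option (List String) × List (List String) :=
  match st with
  | (fce, hf, hdr, data) =>
    if !(line == "") && PySem.Str.isIn "\t" line && !(PySem.Str.startswith line "<")
        && !(PySem.Str.startswith line ">") && !(PySem.Str.startswith line "settings=") then
      if hf then (fce, hf, hdr, data ++ [pvSplit line "\t"]) else (fce, hf, hdr, data)
    else (fce, hf, hdr, data)

-- one loop iteration of A, on the already-stripped line
def pvAStep0 (st : Bool × Bool × Option (List String) × List (List String))
    (line : String) : Bool × Bool × Option (List String) × List (List String) :=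
  match st with
  | (fce, hf, hdr, data) =>
    if PySem.Str.isIn "<column properties>" line then (fce, hf, hdr, data)
    else if PySem.Str.isIn "</column properties>" line then (true, hf, hdr, data)
    else if fce && !(line == "") && PySem.Str.isIn "\t" line
        && !(PySem.Str.startswith line "<") && !(PySem.Str.startswith line ">") && !hf then
      let parts := pvSplit line "\t"
      if 3 ≤ parts.length then (fce, true, some parts, data)
      else pvADataCheck (fce, hf, hdr, data) line
    else pvADataCheck (fce, hf, hdr, data) line

def find_header_and_data_lines (content : String) : Option (List String) × List (List String) :=
  let lines := pvSplit content "\n"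
  let st := lines.foldl (fun st l => pvAStep0 st (PySem.Str.strip l)) (false, false, none, [])
  (st.2.2.1, st.2.2.2)

-- ===== PORT B =====
def pvBDataOk (l : String) : Bool :=
  PySem.Str.isIn "\t" l
    && !(PySem.Str.isIn "<column properties>" l)
    && !(PySem.Str.isIn "</column properties>" l)
    && !(PySem.Str.startswith l "<") && !(PySem.Str.startswith l ">")
    && !(PySem.Str.startswith l "settings=")

-- phase 1: first header line (after the end marker) and the suffix of lines strictly after it
def pvBFindHeader : List String → Bool → Option (List String × List String)
  | [], _ => none
  | l :: ls, seenEnd =>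
    if PySem.Str.isIn "<column properties>" l then pvBFindHeader ls seenEnd
    else if PySem.Str.isIn "</column properties>" l then pvBFindHeader ls true
    else if seenEnd && PySem.Str.isIn "\t" l && !(PySem.Str.startswith l "<")
        && !(PySem.Str.startswith l ">") then
      let parts := pvSplit l "\t"
      if 3 ≤ parts.length then some (parts, ls) else pvBFindHeader ls seenEnd
    else pvBFindHeader ls seenEnd

def find_header_and_data_lines_alt (content : String) : Option (List String) × List (List String) :=
  let lines := (pvSplit content "\n").map PySem.Str.strip
  match pvBFindHeader lines false with
  | none => (none, [])
  | some (parts, rest) =>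
    (some parts, (rest.filter pvBDataOk).map (fun l => pvSplit l "\t"))

-- ===== PRECONDITION & SPEC =====
def Spec_find_header_and_data_lines (content : String) (out : Option (List String) × List (List String)) : Prop := out = find_header_and_data_lines_alt content
instance (content : String) (out : Option (List String) × List (List String)) : Decidable (Spec_find_header_and_data_lines content out) := by unfold Spec_find_header_and_data_lines; infer_instance

-- ===== CLAIM (what is proved, stated in full; the proofs are below) =====
def Claim_equal_find_header_and_data_lines : Prop := ∀ (content : String), Dom_find_header_and_data_lines content → Spec_find_header_and_data_lines content (find_header_and_data_lines content)

-- ===== LEMMAS AND PROOFS =====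

-- a line containing a tab is nonempty
lemma pv_tab_ne_empty (s : String) (h : PySem.Str.isIn "\t" s = true) : (s == "") = false := by
  rcases eq_or_ne s "" with rfl | hne
  · rw [PySem.Str.isIn_iff_infix] at h
    simp at h
  · simp [hne]

-- after the header is found, A's loop only appends B's filtered data rows
lemma pvA_post (ms : List String) : ∀ (fce : Bool) (hdr : Option (List String))
    (acc : List (List String)),
    (ms.foldl pvAStep0 (fce, true, hdr, acc)).2.2 =
      (hdr, acc ++ (ms.filter pvBDataOk).map (fun l => pvSplit l "\t")) := by
  induction ms with
  | nil => intro fce hdr acc; simp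
  | cons m ms ih =>
    intro fce hdr acc
    simp only [List.foldl_cons, pvAStep0, List.filter_cons]
    by_cases h1 : PySem.Str.isIn "<column properties>" m = true
    · simp [h1, ih, pvBDataOk, -PySem.Str.isIn_eq, -PySem.Str.startswith_eq]
    · by_cases h2 : PySem.Str.isIn "</column properties>" m = true
      · simp [h1, h2, ih, pvBDataOk, -PySem.Str.isIn_eq, -PySem.Str.startswith_eq]
      · by_cases ht : PySem.Str.isIn "\t" m = true
        · have hne := pv_tab_ne_empty m ht
          by_cases hlt : PySem.Str.startswith m "<" = true
          · simp [h1, h2, ht, hne, hlt, pvADataCheck, ih, pvBDataOk, -PySem.Str.isIn_eq, -PySem.Str.startswith_eq]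
          · by_cases hgt : PySem.Str.startswith m ">" = true
            · simp [h1, h2, ht, hne, hlt, hgt, pvADataCheck, ih, pvBDataOk, -PySem.Str.isIn_eq, -PySem.Str.startswith_eq]
            · by_cases hst : PySem.Str.startswith m "settings=" = true
              · simp [h1, h2, ht, hne, hlt, hgt, hst, pvADataCheck, ih, pvBDataOk, -PySem.Str.isIn_eq, -PySem.Str.startswith_eq]
              · simp [h1, h2, ht, hne, hlt, hgt, hst, pvADataCheck, ih, pvBDataOk, -PySem.Str.isIn_eq, -PySem.Str.startswith_eq]
        · simp [h1, h2, ht, pvADataCheck, ih, pvBDataOk, -PySem.Str.isIn_eq, -PySem.Str.startswith_eq]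

-- before the header is found, A's loop computes exactly B's phase-1 result
lemma pvA_pre (ms : List String) : ∀ (fce : Bool),
    (ms.foldl pvAStep0 (fce, false, none, [])).2.2 =
      (match pvBFindHeader ms fce with
       | none => (none, ([] : List (List String)))
       | some (parts, rest) =>
         (some parts, (rest.filter pvBDataOk).map (fun l => pvSplit l "\t"))) := by
  induction ms with
  | nil => intro fce; simp [pvBFindHeader]
  | cons m ms ih =>
    intro fce
    simp only [List.foldl_cons, pvAStep0, pvBFindHeader]
    by_cases h1 : PySem.Str.isIn "<column properties>" m = true
    · simp [h1, ih, -PySem.Str.isIn_eq, -PySem.Str.startswith_eq]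
    · by_cases h2 : PySem.Str.isIn "</column properties>" m = true
      · simp [h1, h2, ih, -PySem.Str.isIn_eq, -PySem.Str.startswith_eq]
      · by_cases ht : PySem.Str.isIn "\t" m = true
        · have hne := pv_tab_ne_empty m ht
          cases fce with
          | true =>
            by_cases hlt : PySem.Str.startswith m "<" = true
            · simp [h1, h2, ht, hne, hlt, pvADataCheck, ih, -PySem.Str.isIn_eq, -PySem.Str.startswith_eq]
            · by_cases hgt : PySem.Str.startswith m ">" = true
              · simp [h1, h2, ht, hne, hlt, hgt, pvADataCheck, ih, -PySem.Str.isIn_eq, -PySem.Str.startswith_eq]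
              · by_cases h3 : 3 ≤ (pvSplit m "\t").length
                · simp [h1, h2, ht, hne, hlt, hgt, h3, pvA_post, -PySem.Str.isIn_eq, -PySem.Str.startswith_eq]
                · simp [h1, h2, ht, hne, hlt, hgt, h3, pvADataCheck, ih, -PySem.Str.isIn_eq, -PySem.Str.startswith_eq]
          | false =>
            simp [h1, h2, ht, hne, pvADataCheck, ih, -PySem.Str.isIn_eq, -PySem.Str.startswith_eq]
        · simp [h1, h2, ht, pvADataCheck, ih, -PySem.Str.isIn_eq, -PySem.Str.startswith_eq]

-- ===== VERDICT (by name: the statement is the Claim_ definition above) =====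
theorem find_header_and_data_lines_spec : Claim_equal_find_header_and_data_lines := by
  intro content _
  unfold Spec_find_header_and_data_lines
  show find_header_and_data_lines content = _
  simp only [find_header_and_data_lines, find_header_and_data_lines_alt]
  rw [← List.foldl_map (f := PySem.Str.strip) (g := pvAStep0)]
  rw [pvA_pre]
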